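-- pv_equiv track=rewrite | github.com/antonin-lfv/Compression_cryptographie | arithmetiqueDansZ.py | strExp
-- ===== SOURCE A (Python) =====
-- def strExp(p):
--     """renvoie l'exposant tout beau
--     >>> strExp(9)
--     '⁹'
--     >>> strExp(-19)
--     '-¹⁹'
--     >>> strExp(0)
--     '⁰'
--     >>> strExp(1)
--     ''
--     """
--     SE="⁰¹²³⁴⁵⁶⁷⁸⁹" #Cela serait malin de créer plutôt un dictionnaire
--     SP,SM="⁺","⁻"
--     pt=p
--     if pt==0:return "⁰"
--     if pt==1:return ""
--     if pt<0:
--         return "-"+strExp(-p)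
--     else:
--         ch=""
--     while pt>0:
-- ##        p10p=int(log(pt,10))
-- ##        v10=10**p10p
-- ##        ch+=SE[pt//v10]
-- ##        pt=pt%v10
--           ch,pt =SE[pt%10]+ch ,pt//10
--     return ch
-- ===== SOURCE B (Python) =====
-- def strExp(p):
--     m = abs(p)
--     if m == 1:
--         return '-' if p < 0 else ''
--     sup = str(m).translate(str.maketrans('0123456789', '⁰¹²³⁴⁵⁶⁷⁸⁹'))
--     return '-' + sup if p < 0 else sup
-- ===== Notes on version B (the rewrite author's own statement) =====
-- stated objective: idiomatic
-- what changed: Replaces the per-digit while-loop (and the recursive negative case) with one decimal str() conversion translated through a str.maketrans table, keeping A's special values '' for 1 and '-' for -1.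
import Mathlib
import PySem

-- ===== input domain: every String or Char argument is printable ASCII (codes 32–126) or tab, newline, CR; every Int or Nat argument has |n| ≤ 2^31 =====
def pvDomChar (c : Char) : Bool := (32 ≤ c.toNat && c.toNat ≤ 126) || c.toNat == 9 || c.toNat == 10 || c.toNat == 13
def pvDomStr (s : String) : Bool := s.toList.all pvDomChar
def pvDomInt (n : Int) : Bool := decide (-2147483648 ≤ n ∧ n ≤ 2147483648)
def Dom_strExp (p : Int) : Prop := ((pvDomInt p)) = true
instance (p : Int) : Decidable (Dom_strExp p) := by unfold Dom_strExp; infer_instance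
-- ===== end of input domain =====

-- B replaces A's while-loop digit extraction (and recursion for negatives) by one
-- decimal string conversion mapped through a superscript translation table (idiomatic).

-- ===== PORT A =====
-- the constant SE of A
def strExpSE : String := "⁰¹²³⁴⁵⁶⁷⁸⁹"

-- A's while loop: ch, pt = SE[pt % 10] + ch, pt // 10  while pt > 0
def strExpLoop (pt : Int) (ch : List Char) : List Char :=
  if pt > 0 then
    strExpLoop (PySem.Int.floordiv pt 10)
      (((PySem.Str.pyGet? strExpSE (PySem.Int.mod pt 10)).getD ' ') :: ch)
  else ch
termination_by pt.toNat
decreasing_by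
  simp only [PySem.Int.floordiv]
  rw [Int.fdiv_eq_ediv_of_nonneg _ (by omega)]
  omega

def strExp (p : Int) : String :=
  if p = 0 then "⁰"
  else if p = 1 then ""
  else if p < 0 then String.ofList ('-' :: (strExp (-p)).toList)
  else String.ofList (strExpLoop p [])
termination_by (if p < 0 then 1 else 0)
decreasing_by split_ifs <;> omega

-- ===== PORT B =====
-- the str.maketrans('0123456789','⁰¹²³⁴⁵⁶⁷⁸⁹') table applied to one character
def supTrans (c : Char) : Char :=
  if c = '0' then '⁰' else if c = '1' then '¹' else if c = '2' then '²'
  else if c = '3' then '³' else if c = '4' then '⁴' else if c = '5' then '⁵'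
  else if c = '6' then '⁶' else if c = '7' then '⁷' else if c = '8' then '⁸'
  else if c = '9' then '⁹' else c

def strExp_alt (p : Int) : String :=
  let m : Int := |p|
  if m = 1 then (if p < 0 then "-" else "")
  else
    let sup := String.ofList (((PySem.Int.toStr m).toList).map supTrans)
    if p < 0 then String.ofList ('-' :: sup.toList) else sup

-- ===== PRECONDITION & SPEC =====
def Spec_strExp (p : Int) (out : String) : Prop := out = strExp_alt p
instance (p : Int) (out : String) : Decidable (Spec_strExp p out) := by unfold Spec_strExp; infer_instance

-- ===== CLAIM (what is proved, stated in full; the proofs are below) =====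
def Claim_equal_strExp : Prop := ∀ (p : Int), Dom_strExp p → Spec_strExp p (strExp p)

-- ===== LEMMAS AND PROOFS =====

-- SE[d] is the superscript translation of the digit character d, for d < 10
lemma pyGet_SE (d : Nat) (hd : d < 10) :
    PySem.Str.pyGet? strExpSE ((d : Nat) : Int) = some (supTrans (Nat.digitChar d)) := by
  revert hd; revert d; decide

-- A's loop produces exactly the translated digits of Nat.toDigitsCore
lemma loop_eq_core : ∀ (f n : Nat) (ds acc : List Char), 0 < n → n < f →
    strExpLoop (n : Int) (ds.map supTrans ++ acc) =
      (Nat.toDigitsCore 10 f n ds).map supTrans ++ acc := by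
  intro f
  induction f with
  | zero => intro n ds acc hn hf; omega
  | succ g ih =>
    intro n ds acc hn hf
    rw [strExpLoop]
    have hmod : PySem.Int.mod (n : Int) 10 = (((n % 10 : Nat) : Nat) : Int) := by
      simp only [PySem.Int.mod]
      rw [Int.fmod_eq_emod]
      simp
    have hdiv : PySem.Int.floordiv (n : Int) 10 = ((n / 10 : Nat) : Int) := by
      simp only [PySem.Int.floordiv]
      rw [Int.fdiv_eq_ediv_of_nonneg _ (by omega)]
      omega
    rw [if_pos (by exact_mod_cast hn), hmod, hdiv, pyGet_SE (n % 10) (Nat.mod_lt _ (by norm_num))]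
    simp only [Option.getD_some]
    show strExpLoop ((n / 10 : Nat) : Int)
        (((Nat.digitChar (n % 10) :: ds).map supTrans) ++ acc) = _
    rw [Nat.toDigitsCore]
    by_cases h0 : n / 10 = 0
    · rw [if_pos h0, h0]
      rw [strExpLoop]
      simp
    · rw [if_neg h0]
      exact ih (n / 10) (Nat.digitChar (n % 10) :: ds) acc (Nat.pos_of_ne_zero h0) (by omega)

lemma loop_eq_digits (n : Nat) (hn : 0 < n) :
    strExpLoop (n : Int) [] = (Nat.toDigits 10 n).map supTrans := by
  have := loop_eq_core (n + 1) n [] [] hn (Nat.lt_succ_self n)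
  simpa [Nat.toDigits] using this

-- B's translated string for a positive argument is A's loop output
lemma alt_sup_eq (n : Nat) (hn : 0 < n) :
    ((PySem.Int.toStr ((n : Nat) : Int)).toList).map supTrans = strExpLoop ((n : Nat) : Int) [] := by
  rw [loop_eq_digits n hn]
  simp only [PySem.Int.toStr, PySem.Int.toChars]
  rw [if_neg (by omega)]
  simp

-- B for a negative argument p ≤ -2 prefixes '-' to B of -p
lemma alt_neg (p : Int) (hp : p ≤ -2) :
    strExp_alt p = String.ofList ('-' :: (strExp_alt (-p)).toList) := by
  simp only [strExp_alt]
  rw [abs_of_nonpos (by omega : p ≤ 0), abs_of_nonneg (by omega : (0:Int) ≤ -p)]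
  simp [show ¬ (-p = 1) from by omega, show p < 0 from by omega, show ¬ (0 < p) from by omega]

-- the positive case, n ≥ 2
lemma strExp_pos (n : Nat) (hn : 2 ≤ n) : strExp ((n : Nat) : Int) = strExp_alt ((n : Nat) : Int) := by
  rw [strExp, if_neg (by omega), if_neg (by exact_mod_cast (by omega : (n : Int) ≠ 1)),
    if_neg (by omega)]
  rw [strExp_alt]
  simp only [abs_of_nonneg (by omega : (0:Int) ≤ (n : Int))]
  rw [if_neg (by exact_mod_cast (by omega : (n : Int) ≠ 1)), if_neg (by omega)]
  rw [alt_sup_eq n (by omega)]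

-- ===== VERDICT (by name: the statement is the Claim_ definition above) =====
theorem strExp_spec : Claim_equal_strExp := by
  unfold Claim_equal_strExp
  intro p _
  unfold Spec_strExp
  rcases lt_trichotomy p 0 with hneg | hz | hpos
  · -- p < 0
    rw [strExp, if_neg (by omega), if_neg (by omega), if_pos hneg]
    by_cases h1 : p = -1
    · subst h1
      rw [show -(-1 : Int) = 1 from rfl, strExp, if_neg (by omega), if_pos rfl]
      rw [show strExp_alt (-1) = "-" from by simp only [strExp_alt]; norm_num]
      decide
    · -- p ≤ -2
      obtain ⟨n, hn⟩ : ∃ n : Nat, -p = (n : Int) := ⟨(-p).toNat, by omega⟩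
      rw [alt_neg p (by omega), hn, strExp_pos n (by omega)]
  · subst hz
    rw [strExp, if_pos rfl]
    rw [show strExp_alt 0 = String.ofList (((PySem.Int.toStr 0).toList).map supTrans) from by
      simp only [strExp_alt]; norm_num]
    decide
  · by_cases h1 : p = 1
    · subst h1
      rw [strExp, if_neg (by omega), if_pos rfl]
      simp only [strExp_alt]
      norm_num
    · obtain ⟨n, hn⟩ : ∃ n : Nat, p = (n : Int) := ⟨p.toNat, by omega⟩
      rw [hn]
      exact strExp_pos n (by omega)
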